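-- pv_equiv track=rewrite | github.com/pypi-data/pypi-mirror-347 | packages/tools-hjh/tools_hjh-2.11.15.tar.gz/tools_hjh-2.11.15/tools_hjh/Tools.py | sql_remove_comments
-- ===== SOURCE A (Python) =====
-- def sql_remove_comments(text):
--     """ sql中有--注释，直接带入可能会不识别，通过此方法去掉注释 """
--     sql = ''
--     for line in text.split('\n'):
--         if '--' in line:
--             sql_line = line.split('--')[0]
--         else:
--             sql_line = line
--         sql = sql + ' ' + sql_line
--     sql = merge_spaces(sql.replace('\n', ' '))
--     return sql
--
-- def merge_spaces(s):
--     """ 空格合并(\t会视为空格，\n不会)，直到不存在多个连续空格 """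
--     s2 = ''
--     s = s.replace('\t', ' ')
--     for line in s.split('\n'):
--         s2 = s2 + ' '.join(line.split()) + '\n'
--     return s2.strip()
-- ===== SOURCE B (Python) =====
-- def sql_remove_comments(text):
--     """ One pass: collect whitespace-split tokens of each line's pre-comment part, join once. """
--     words = []
--     for line in text.split('\n'):
--         words.extend(line.split('--', 1)[0].split())
--     return ' '.join(words)
-- ===== Notes on version B (the rewrite author's own statement) =====
-- stated objective: simpler
-- what changed: B collects the whitespace-split tokens of each line's pre-comment part into one list in a single pass and joins them once, replacing A's repeated string concatenation plus the separate merge_spaces second pass (replace/split/strip).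
import Mathlib
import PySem

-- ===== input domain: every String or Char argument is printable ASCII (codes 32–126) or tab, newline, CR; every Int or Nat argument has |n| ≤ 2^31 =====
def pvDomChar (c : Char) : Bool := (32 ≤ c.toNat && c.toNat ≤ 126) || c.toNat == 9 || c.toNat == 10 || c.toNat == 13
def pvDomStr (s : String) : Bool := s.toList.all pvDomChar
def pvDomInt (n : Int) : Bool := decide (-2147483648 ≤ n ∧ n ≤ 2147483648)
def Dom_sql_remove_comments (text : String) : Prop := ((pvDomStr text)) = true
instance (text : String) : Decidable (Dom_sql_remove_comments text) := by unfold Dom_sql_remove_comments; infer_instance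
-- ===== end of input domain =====

-- B strips each line's '--' comment and collects whitespace-split tokens in one pass, joining once,
-- instead of A's repeated string concatenation followed by a second collapse pass (merge_spaces).

-- ===== PORT A =====
-- helper merge_spaces, transliterated at the List Char level (PySem.Chars = Python str semantics)
def merge_spaces_port (s : List Char) : List Char :=
  let s1 := PySem.Chars.replace s ['\t'] [' ']
  let s2 := (PySem.Chars.splitOn s1 ['\n']).foldl
    (fun s2 line => s2 ++ PySem.Chars.join [' '] (PySem.Chars.split₀ line) ++ ['\n']) []
  PySem.Chars.strip s2

-- "line.split('--')[0]": split by a nonempty separator always yields a nonempty list, so [0] is headD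
def sql_remove_comments (text : String) : String :=
  let sql := (PySem.Chars.splitOn text.toList ['\n']).foldl
    (fun sql line =>
      let sql_line := if PySem.Chars.isIn ['-', '-'] line then
          (PySem.Chars.splitOn line ['-', '-']).headD []
        else line
      sql ++ [' '] ++ sql_line) []
  String.ofList (merge_spaces_port (PySem.Chars.replace sql ['\n'] [' ']))

-- ===== PORT B =====
-- "line.split('--', 1)[0]": same nonemptiness, so [0] is headD
def sql_remove_comments_alt (text : String) : String :=
  let words := (PySem.Chars.splitOn text.toList ['\n']).foldl
    (fun acc line =>
      acc ++ PySem.Chars.split₀ ((PySem.Chars.splitOnMax line ['-', '-'] 1).headD [])) []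
  String.ofList (PySem.Chars.join [' '] words)

-- ===== PRECONDITION & SPEC =====
def Spec_sql_remove_comments (text : String) (out : String) : Prop := out = sql_remove_comments_alt text
instance (text : String) (out : String) : Decidable (Spec_sql_remove_comments text out) := by unfold Spec_sql_remove_comments; infer_instance

-- ===== CLAIM (what is proved, stated in full; the proofs are below) =====
def Claim_equal_sql_remove_comments : Prop := ∀ (text : String), Dom_sql_remove_comments text → Spec_sql_remove_comments text (sql_remove_comments text)

-- ===== LEMMAS AND PROOFS =====

-- the prefix of l before its first "--" (what split('--')[0] returns)
def ddFirst : List Char → List Char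
  | [] => []
  | c :: t => if ['-', '-'].isPrefixOf (c :: t) then [] else c :: ddFirst t

-- the whitespace-separated words of s (what s.split() returns)
def pvWords : List Char → List (List Char)
  | [] => []
  | c :: t =>
    if PySem.Chars.isspace c then pvWords t
    else (c :: t.takeWhile (fun x => !PySem.Chars.isspace x)) ::
      pvWords (t.dropWhile (fun x => !PySem.Chars.isspace x))
termination_by l => l.length
decreasing_by
  all_goals simp
  all_goals (have := List.length_dropWhile_le (fun x => !PySem.Chars.isspace x) t; omega)

def pvTabmap (c : Char) : Char := if c = '\t' then ' ' else c

def pvGood (ws : List (List Char)) : Prop :=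
  ∀ w ∈ ws, w ≠ [] ∧ ∀ ch ∈ w, PySem.Chars.isspace ch = false

theorem splitOn_go_acc (sep : List Char) (fuel : Nat) :
    ∀ (l cur : List Char) (acc : List (List Char)),
      PySem.Chars.splitOn.go sep fuel l cur acc =
        acc.reverse ++ PySem.Chars.splitOn.go sep fuel l cur [] := by
  induction fuel with
  | zero => intro l cur acc; simp [PySem.Chars.splitOn.go]
  | succ fuel ih =>
    intro l cur acc
    cases l with
    | nil => simp [PySem.Chars.splitOn.go]
    | cons c rest =>
      simp only [PySem.Chars.splitOn.go]
      split
      · rw [ih _ [] (cur.reverse :: acc), ih _ [] [cur.reverse]]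
        simp
      · exact ih _ _ _

theorem splitOn_go_headD (fuel : Nat) :
    ∀ (l cur : List Char), l.length < fuel →
      (PySem.Chars.splitOn.go ['-', '-'] fuel l cur []).headD [] = cur.reverse ++ ddFirst l := by
  induction fuel with
  | zero => intro l cur h; omega
  | succ fuel ih =>
    intro l cur h
    cases l with
    | nil => simp [PySem.Chars.splitOn.go, ddFirst]
    | cons c rest =>
      simp only [PySem.Chars.splitOn.go, ddFirst]
      split
      · rw [splitOn_go_acc]; simp
      · rw [ih rest (c :: cur) (by simpa using Nat.lt_of_succ_lt_succ h)]
        simp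

theorem splitOn_headD (l : List Char) :
    (PySem.Chars.splitOn l ['-', '-']).headD [] = ddFirst l := by
  have := splitOn_go_headD (l.length + 1) l [] (by omega)
  simpa [PySem.Chars.splitOn] using this

theorem splitOnMax_go_acc (sep : List Char) (fuel : Nat) :
    ∀ (m : Nat) (l cur : List Char) (acc : List (List Char)),
      PySem.Chars.splitOnMax.go sep fuel m l cur acc =
        acc.reverse ++ PySem.Chars.splitOnMax.go sep fuel m l cur [] := by
  induction fuel with
  | zero => intro m l cur acc; simp [PySem.Chars.splitOnMax.go]
  | succ fuel ih =>
    intro m l cur acc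
    cases l with
    | nil => simp [PySem.Chars.splitOnMax.go]
    | cons c rest =>
      simp only [PySem.Chars.splitOnMax.go]
      split
      · simp
      · split
        · rw [ih _ _ [] (cur.reverse :: acc), ih _ _ [] [cur.reverse]]
          simp
        · exact ih _ _ _ _

theorem splitOnMax_go_headD (fuel : Nat) :
    ∀ (l cur : List Char), l.length < fuel →
      (PySem.Chars.splitOnMax.go ['-', '-'] fuel 1 l cur []).headD [] = cur.reverse ++ ddFirst l := by
  induction fuel with
  | zero => intro l cur h; omega
  | succ fuel ih =>
    intro l cur h
    cases l with
    | nil => simp [PySem.Chars.splitOnMax.go, ddFirst]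
    | cons c rest =>
      simp only [PySem.Chars.splitOnMax.go, ddFirst]
      split
      · omega
      · split
        · rw [splitOnMax_go_acc]; simp
        · rw [ih rest (c :: cur) (by simpa using Nat.lt_of_succ_lt_succ h)]
          simp

theorem splitOnMax_headD (l : List Char) :
    (PySem.Chars.splitOnMax l ['-', '-'] 1).headD [] = ddFirst l := by
  have := splitOnMax_go_headD (l.length + 1) l [] (by omega)
  simpa [PySem.Chars.splitOnMax] using this

theorem ddFirst_of_not_isIn (l : List Char) (h : PySem.Chars.isIn ['-', '-'] l = false) :
    ddFirst l = l := by
  rw [PySem.Chars.isIn_eq_false_iff] at h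
  induction l with
  | nil => rfl
  | cons c t ih =>
    rw [ddFirst]
    split
    · exact absurd ((List.IsPrefix.isInfix (List.isPrefixOf_iff_prefix.mp (by assumption)))) h
    · rw [ih (fun hx => h (hx.trans (List.suffix_cons c t).isInfix))]

theorem mem_ddFirst (x : Char) : ∀ (l : List Char), x ∈ ddFirst l → x ∈ l := by
  intro l
  induction l with
  | nil => simp [ddFirst]
  | cons c t ih =>
    rw [ddFirst]
    split
    · simp
    · intro hx
      rcases List.mem_cons.mp hx with h1 | h1
      · simp [h1]
      · exact List.mem_cons_of_mem _ (ih h1)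
theorem splitOn_go_not_mem (c : Char) (fuel : Nat) :
    ∀ (l cur : List Char) (acc : List (List Char)), l.length < fuel →
      c ∉ cur → (∀ p ∈ acc, c ∉ p) →
      ∀ p ∈ PySem.Chars.splitOn.go [c] fuel l cur acc, c ∉ p := by
  induction fuel with
  | zero => intro l cur acc h; omega
  | succ fuel ih =>
    intro l cur acc h hcur hacc p hp
    cases l with
    | nil =>
      simp only [PySem.Chars.splitOn.go] at hp
      simp only [List.reverse_cons, List.mem_append, List.mem_reverse] at hp
      rcases hp with hp | hp
      · exact hacc p (List.mem_reverse.mp (by simpa using hp))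
      · simp at hp; subst hp; simpa using hcur
    | cons c' rest =>
      simp only [PySem.Chars.splitOn.go] at hp
      split at hp
      · rename_i hpre
        refine ih _ [] _ (by simp at h ⊢; omega) (by simp) ?_ p hp
        intro q hq
        rcases List.mem_cons.mp hq with hq | hq
        · subst hq; simpa using hcur
        · exact hacc q hq
      · exact ih rest (c' :: cur) acc (by simp at h ⊢; omega)
          (by rename_i hpre; simp [List.isPrefixOf] at hpre
              intro hm; rcases List.mem_cons.mp hm with h1 | h1
              · exact hpre h1
              · exact hcur h1) hacc p hp

theorem splitOn_not_mem (c : Char) (s : List Char) :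
    ∀ p ∈ PySem.Chars.splitOn s [c], c ∉ p := by
  exact splitOn_go_not_mem c (s.length + 1) s [] [] (by omega) (by simp) (by simp)
theorem replace_go_no_nl (fuel : Nat) :
    ∀ (l acc : List Char), '\n' ∉ l →
      PySem.Chars.replace.go ['\n'] [' '] fuel l acc = acc.reverse ++ l := by
  induction fuel with
  | zero => intro l acc h; simp [PySem.Chars.replace.go]
  | succ fuel ih =>
    intro l acc h
    cases l with
    | nil => simp [PySem.Chars.replace.go]
    | cons c t =>
      simp only [PySem.Chars.replace.go]
      split
      · rename_i hpre
        simp [List.isPrefixOf] at hpre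
        exact absurd (hpre ▸ List.mem_cons_self) h
      · rw [ih t (c :: acc) (fun hm => h (List.mem_cons_of_mem _ hm))]
        simp

theorem replace_no_nl (s : List Char) (h : '\n' ∉ s) :
    PySem.Chars.replace s ['\n'] [' '] = s := by
  simpa [PySem.Chars.replace] using replace_go_no_nl s.length s [] h

theorem replace_go_tab (fuel : Nat) :
    ∀ (l acc : List Char), l.length ≤ fuel →
      PySem.Chars.replace.go ['\t'] [' '] fuel l acc = acc.reverse ++ l.map pvTabmap := by
  induction fuel with
  | zero =>
    intro l acc h
    have : l = [] := List.eq_nil_of_length_eq_zero (by omega)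
    subst this; simp [PySem.Chars.replace.go]
  | succ fuel ih =>
    intro l acc h
    cases l with
    | nil => simp [PySem.Chars.replace.go]
    | cons c t =>
      simp only [PySem.Chars.replace.go]
      split
      · rename_i hpre
        simp [List.isPrefixOf] at hpre
        rw [show List.drop (['\t'].length) (c :: t) = t by simp,
            ih t ([' '].reverse ++ acc) (by simp at h; omega)]
        simp [pvTabmap, ← hpre]
      · rename_i hpre
        simp [List.isPrefixOf] at hpre
        rw [ih t (c :: acc) (by simp at h; omega)]
        simp only [List.reverse_cons, List.map_cons, List.append_assoc, List.singleton_append,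
          pvTabmap]
        rw [if_neg (fun hc => hpre hc.symm)]
  
theorem replace_tab (s : List Char) :
    PySem.Chars.replace s ['\t'] [' '] = s.map pvTabmap := by
  simpa [PySem.Chars.replace] using replace_go_tab s.length s [] le_rfl

theorem splitOn_no_nl (s : List Char) (h : '\n' ∉ s) :
    PySem.Chars.splitOn s ['\n'] = [s] := by
  suffices hgo : ∀ fuel l cur acc, '\n' ∉ l →
      PySem.Chars.splitOn.go ['\n'] fuel l cur acc = ((cur.reverse ++ l) :: acc).reverse by
    simpa [PySem.Chars.splitOn] using hgo (s.length + 1) s [] [] h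
  intro fuel
  induction fuel with
  | zero => intro l cur acc h; simp [PySem.Chars.splitOn.go]
  | succ fuel ih =>
    intro l cur acc h
    cases l with
    | nil => simp [PySem.Chars.splitOn.go]
    | cons c t =>
      simp only [PySem.Chars.splitOn.go]
      split
      · rename_i hpre
        simp [List.isPrefixOf] at hpre
        exact absurd (hpre ▸ List.mem_cons_self) h
      · rw [ih t (c :: cur) acc (fun hm => h (List.mem_cons_of_mem _ hm))]
        simp
theorem split₀_go_eq (l : List Char) :
    ∀ (cur : List Char) (acc : List (List Char)),
      PySem.Chars.split₀.go l cur acc =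
        acc.reverse ++ (if cur.isEmpty then pvWords l
          else (cur.reverse ++ l.takeWhile (fun x => !PySem.Chars.isspace x)) ::
            pvWords (l.dropWhile (fun x => !PySem.Chars.isspace x))) := by
  induction l with
  | nil =>
    intro cur acc
    cases cur <;> simp [PySem.Chars.split₀.go, pvWords]
  | cons c t ih =>
    intro cur acc
    simp only [PySem.Chars.split₀.go]
    by_cases hs : PySem.Chars.isspace c
    · rw [if_pos hs]
      cases cur with
      | nil => simp [ih, pvWords, hs]
      | cons a b =>
        simp only [List.isEmpty_cons, ite_false, Bool.false_eq_true, if_neg]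
        rw [ih [] ((a :: b).reverse :: acc)]
        simp [pvWords, hs, List.takeWhile_cons, List.dropWhile_cons]
    · rw [if_neg hs]
      rw [ih (c :: cur) acc]
      cases cur <;> simp [pvWords, hs, List.takeWhile_cons, List.dropWhile_cons]

theorem split₀_eq_pvWords (s : List Char) : PySem.Chars.split₀ s = pvWords s := by
  simpa [PySem.Chars.split₀] using split₀_go_eq s [] []

theorem dropWhile_append_not (P : Char → Bool) (sp : Char) (hsp : P sp = false) :
    ∀ (a b : List Char), List.dropWhile P (a ++ sp :: b) = List.dropWhile P a ++ sp :: b := by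
  intro a b
  induction a with
  | nil => simp [List.dropWhile_cons, hsp]
  | cons c t ih => by_cases h : P c <;> simp [List.dropWhile_cons, h, ih]

theorem takeWhile_append_not (P : Char → Bool) (sp : Char) (hsp : P sp = false) :
    ∀ (a b : List Char), List.takeWhile P (a ++ sp :: b) = List.takeWhile P a := by
  intro a b
  induction a with
  | nil => simp [List.takeWhile_cons, hsp]
  | cons c t ih => by_cases h : P c <;> simp [List.takeWhile_cons, h, ih]

theorem pvWords_append_space (sp : Char) (hsp : PySem.Chars.isspace sp = true) :
    ∀ (n : Nat) (a b : List Char), a.length ≤ n →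
      pvWords (a ++ sp :: b) = pvWords a ++ pvWords b := by
  intro n
  induction n with
  | zero =>
    intro a b h
    have : a = [] := List.eq_nil_of_length_eq_zero (by omega)
    subst this
    simp [pvWords, hsp]
  | succ n ih =>
    intro a b h
    cases a with
    | nil => simp [pvWords, hsp]
    | cons c t =>
      by_cases hc : PySem.Chars.isspace c
      · rw [List.cons_append, pvWords, if_pos hc, pvWords, if_pos hc]
        exact ih t b (by simp at h; omega)
      · rw [List.cons_append, pvWords, if_neg hc, pvWords, if_neg hc,
          takeWhile_append_not _ sp (by simp [hsp]) t b,
          dropWhile_append_not _ sp (by simp [hsp]) t b]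
        rw [ih (t.dropWhile (fun x => !PySem.Chars.isspace x)) b
          (by have := List.length_dropWhile_le (fun x => !PySem.Chars.isspace x) t
              simp at h; omega)]
        simp

theorem pvWords_map_tabmap : ∀ (n : Nat) (s : List Char), s.length ≤ n →
    pvWords (s.map pvTabmap) = pvWords s := by
  intro n
  induction n with
  | zero =>
    intro s h
    have : s = [] := List.eq_nil_of_length_eq_zero (by omega)
    subst this; rfl
  | succ n ih =>
    intro s h
    cases s with
    | nil => rfl
    | cons c t =>
      have hsp : PySem.Chars.isspace (pvTabmap c) = PySem.Chars.isspace c := by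
        by_cases hc : c = '\t' <;> simp [pvTabmap, hc] <;> decide
      by_cases hc : PySem.Chars.isspace c
      · rw [List.map_cons, pvWords, if_pos (hsp.trans hc), pvWords, if_pos hc]
        exact ih t (by simp at h; omega)
      · have hcc : pvTabmap c = c := by
          simp [pvTabmap]
          intro he; subst he; exact absurd (by decide) hc
        have hPf : (fun x => !PySem.Chars.isspace x) ∘ pvTabmap = (fun x => !PySem.Chars.isspace x) := by
          funext x
          by_cases hx : x = '\t' <;> simp [pvTabmap, hx] <;> decide
        rw [List.map_cons, pvWords, hcc, if_neg hc, pvWords, if_neg hc,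
          List.takeWhile_map, List.dropWhile_map, hPf]
        have hmapid : (t.takeWhile (fun x => !PySem.Chars.isspace x)).map pvTabmap
            = t.takeWhile (fun x => !PySem.Chars.isspace x) := by
          conv_rhs => rw [← List.map_id (t.takeWhile (fun x => !PySem.Chars.isspace x))]
          apply List.map_congr_left
          intro x hx
          have hxs := List.mem_takeWhile_imp hx
          simp at hxs
          simp [pvTabmap]
          intro he; subst he; exact absurd hxs (by decide)
        rw [hmapid, ih (t.dropWhile (fun x => !PySem.Chars.isspace x))
          (by have := List.length_dropWhile_le (fun x => !PySem.Chars.isspace x) t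
              simp at h; omega)]

theorem pvWords_good : ∀ (n : Nat) (s : List Char), s.length ≤ n → pvGood (pvWords s) := by
  intro n
  induction n with
  | zero =>
    intro s h
    have : s = [] := List.eq_nil_of_length_eq_zero (by omega)
    subst this; intro w hw; simp [pvWords] at hw
  | succ n ih =>
    intro s h
    cases s with
    | nil => intro w hw; simp [pvWords] at hw
    | cons c t =>
      by_cases hc : PySem.Chars.isspace c
      · rw [pvWords, if_pos hc]; exact ih t (by simp at h; omega)
      · rw [pvWords, if_neg hc]
        intro w hw
        rcases List.mem_cons.mp hw with hw | hw
        · subst hw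
          refine ⟨by simp, ?_⟩
          intro ch hch
          rcases List.mem_cons.mp hch with h1 | h1
          · subst h1; simpa using hc
          · have := List.mem_takeWhile_imp h1
            simpa using this
        · exact ih (t.dropWhile (fun x => !PySem.Chars.isspace x))
            (by have := List.length_dropWhile_le (fun x => !PySem.Chars.isspace x) t
                simp at h; omega) w hw

theorem pvWords_space_cons (c : Char) (t : List Char) (hc : PySem.Chars.isspace c = true) :
    pvWords (c :: t) = pvWords t := by
  rw [pvWords, if_pos hc]

theorem pvWords_flatMap (g : List Char → List Char) :
    ∀ (ls : List (List Char)),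
      pvWords (ls.flatMap (fun l => ' ' :: g l)) = ls.flatMap (fun l => pvWords (g l)) := by
  intro ls
  induction ls with
  | nil => simp [pvWords]
  | cons l rest ih =>
    rw [List.flatMap_cons, List.flatMap_cons, List.cons_append,
      pvWords_space_cons _ _ (by decide)]
    cases rest with
    | nil => simp
    | cons l2 rest2 =>
      rw [List.flatMap_cons, List.cons_append] at ih ⊢
      rw [pvWords_space_cons _ _ (by decide)] at ih
      rw [pvWords_append_space ' ' (by decide) (g l).length (g l) _ le_rfl, ih]

theorem join_head (ws : List (List Char)) :
    ∀ (_ : pvGood ws) (_ : ws ≠ []),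
      ∃ c r, PySem.Chars.join [' '] ws = c :: r ∧ PySem.Chars.isspace c = false := by
  induction ws with
  | nil => intro _ hne; exact absurd rfl hne
  | cons w rest _ =>
    intro hg _
    have hw := hg w (by simp)
    rcases List.exists_cons_of_ne_nil hw.1 with ⟨c, r, hc⟩
    cases rest with
    | nil =>
      exact ⟨c, r, by rw [PySem.Chars.join_singleton, hc],
        hw.2 c (hc ▸ List.mem_cons_self)⟩
    | cons w2 rest2 =>
      rw [PySem.Chars.join_cons_cons, hc]
      exact ⟨c, r ++ [' '] ++ PySem.Chars.join [' '] (w2 :: rest2), by simp,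
        hw.2 c (hc ▸ List.mem_cons_self)⟩

theorem join_reverse_head (ws : List (List Char)) :
    ∀ (_ : pvGood ws) (_ : ws ≠ []),
      ∃ c r, (PySem.Chars.join [' '] ws).reverse = c :: r ∧ PySem.Chars.isspace c = false := by
  induction ws with
  | nil => intro _ hne; exact absurd rfl hne
  | cons w rest ih =>
    intro hg _
    cases rest with
    | nil =>
      have hw := hg w (by simp)
      have hrevne : w.reverse ≠ [] := by simpa using hw.1
      rcases List.exists_cons_of_ne_nil hrevne with ⟨c, r, hc⟩
      exact ⟨c, r, by rw [PySem.Chars.join_singleton, hc],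
        hw.2 c (List.mem_reverse.mp (hc ▸ List.mem_cons_self))⟩
    | cons w2 rest2 =>
      rcases ih (fun x hx => hg x (List.mem_cons_of_mem _ hx)) (by simp) with ⟨c, r, hc, hcs⟩
      refine ⟨c, r ++ [' '].reverse ++ w.reverse, ?_, hcs⟩
      rw [PySem.Chars.join_cons_cons]
      simp only [List.reverse_append, hc]
      simp

theorem strip_join_nl (ws : List (List Char)) (hg : pvGood ws) :
    PySem.Chars.strip (PySem.Chars.join [' '] ws ++ ['\n']) = PySem.Chars.join [' '] ws := by
  by_cases hne : ws = []
  · subst hne; rw [PySem.Chars.join_nil]; decide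
  · rcases join_head ws hg hne with ⟨c0, r0, hc0, hs0⟩
    rcases join_reverse_head ws hg hne with ⟨c1, r1, hc1, hs1⟩
    rw [PySem.Chars.strip, PySem.Chars.lstrip, hc0, List.cons_append,
      List.dropWhile_cons_of_neg (by simp [hs0]), ← List.cons_append, ← hc0,
      PySem.Chars.rstrip, List.reverse_append]
    simp only [List.reverse_singleton, List.singleton_append]
    rw [List.dropWhile_cons_of_pos (by decide), hc1,
      List.dropWhile_cons_of_neg (by simp [hs1]), ← hc1, List.reverse_reverse]


-- ===== VERDICT (by name: the statement is the Claim_ definition above) =====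
theorem sql_remove_comments_spec : Claim_equal_sql_remove_comments := by
  intro text _
  unfold Spec_sql_remove_comments sql_remove_comments sql_remove_comments_alt merge_spaces_port
  simp only []
  set lines := PySem.Chars.splitOn text.toList ['\n'] with hlines
  have hlinesNl : ∀ l ∈ lines, '\n' ∉ l := splitOn_not_mem '\n' text.toList
  -- A's accumulation loop builds S = flatMap (' ' :: ddFirst l)
  have hA : lines.foldl (fun sql line =>
        sql ++ [' '] ++ (if PySem.Chars.isIn ['-', '-'] line then
          (PySem.Chars.splitOn line ['-', '-']).headD [] else line)) []
      = lines.flatMap (fun l => ' ' :: ddFirst l) := by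
    have hfg : ∀ (acc : List Char) (x : List Char), x ∈ lines →
        (acc ++ [' '] ++ (if PySem.Chars.isIn ['-', '-'] x then
          (PySem.Chars.splitOn x ['-', '-']).headD [] else x))
        = acc ++ (' ' :: ddFirst x) := by
      intro acc x _
      by_cases hin : PySem.Chars.isIn ['-', '-'] x
      · rw [if_pos hin, splitOn_headD]; simp
      · rw [if_neg hin, ddFirst_of_not_isIn x (by simpa using hin)]; simp
    rw [PySem.List.foldl_congr_mem lines _ (fun sql line => sql ++ (' ' :: ddFirst line)) [] hfg]
    simpa using PySem.List.foldl_append_eq_flatMap (fun l => ' ' :: ddFirst l) (acc := []) (l := lines)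
  rw [hA]
  have hSnl : '\n' ∉ lines.flatMap (fun l => ' ' :: ddFirst l) := by
    intro hm
    rcases List.mem_flatMap.mp hm with ⟨l, hl, hml⟩
    rcases List.mem_cons.mp hml with h1 | h1
    · exact absurd h1 (by decide)
    · exact hlinesNl l hl (mem_ddFirst '\n' l h1)
  rw [replace_no_nl _ hSnl, replace_tab]
  have hTnl : '\n' ∉ (lines.flatMap (fun l => ' ' :: ddFirst l)).map pvTabmap := by
    intro hm
    rcases List.mem_map.mp hm with ⟨c, hc, hc2⟩
    have hcn : c = '\n' := by
      by_cases h : c = '\t'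
      · rw [pvTabmap, if_pos h] at hc2; exact absurd hc2 (by decide)
      · rwa [pvTabmap, if_neg h] at hc2
    exact hSnl (hcn ▸ hc)
  rw [splitOn_no_nl _ hTnl]
  simp only [List.foldl_cons, List.foldl_nil, List.nil_append]
  rw [split₀_eq_pvWords,
    pvWords_map_tabmap (lines.flatMap (fun l => ' ' :: ddFirst l)).length _ le_rfl,
    pvWords_flatMap ddFirst lines]
  have hB : lines.foldl (fun acc line =>
        acc ++ PySem.Chars.split₀ ((PySem.Chars.splitOnMax line ['-', '-'] 1).headD [])) []
      = lines.flatMap (fun l => pvWords (ddFirst l)) := by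
    have hfg : ∀ (acc : List (List Char)), ∀ x ∈ lines,
        acc ++ PySem.Chars.split₀ ((PySem.Chars.splitOnMax x ['-', '-'] 1).headD [])
        = acc ++ pvWords (ddFirst x) := by
      intro acc x _
      rw [splitOnMax_headD, split₀_eq_pvWords]
    rw [PySem.List.foldl_congr_mem lines _ (fun acc line => acc ++ pvWords (ddFirst line)) [] hfg]
    simpa using PySem.List.foldl_append_eq_flatMap (fun l => pvWords (ddFirst l)) lines []
  rw [hB]
  congr 1
  apply strip_join_nl
  intro w hw
  rcases List.mem_flatMap.mp hw with ⟨l, hl, hwl⟩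
  exact pvWords_good (ddFirst l).length (ddFirst l) le_rfl w hwl
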